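-- pv_equiv track=rewrite | github.com/pypi-data/pypi-mirror-385 | packages/sparkforge/sparkforge-1.3.3.tar.gz/sparkforge-1.3.3/tests/unit/test_dict_annotations.py | _is_in_string
-- ===== SOURCE A (Python) =====
-- def _is_in_string(line: str, pattern: str) -> bool:
--     """Check if pattern is inside a string literal."""
--     in_string = False
--     quote_char = None
--
--     for i, char in enumerate(line):
--         if char in ['"', "'"] and (i == 0 or line[i - 1] != "\\"):
--             if not in_string:
--                 in_string = True
--                 quote_char = char
--             elif char == quote_char:
--                 in_string = False
--                 quote_char = None
--         elif in_string and pattern in line[i : i + len(pattern)]: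
--             return True
--
--     return False
-- ===== SOURCE B (Python) =====
-- def _is_in_string(line: str, pattern: str) -> bool:
--     """Check if pattern is inside a string literal.
--
--     Two-phase rewrite: one pass builds the in-string eligibility mask,
--     then str.find jumps between occurrences of pattern and checks each
--     occurrence against the mask.
--     """
--     mask = []
--     in_string = False
--     quote_char = None
--     for i, ch in enumerate(line):
--         if ch in ('"', "'") and (i == 0 or line[i - 1] != "\\"):
--             if not in_string:
--                 in_string = True
--                 quote_char = ch
--             elif ch == quote_char:
--                 in_string = False
--                 quote_char = None
--             mask.append(False)
--         else:
--             mask.append(in_string)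
--     if not pattern:
--         return any(mask)
--     start = 0
--     while True:
--         j = line.find(pattern, start)
--         if j == -1:
--             return False
--         if mask[j]:
--             return True
--         start = j + 1
-- ===== Notes on version B (the rewrite author's own statement) =====
-- stated objective: alternative
-- what changed: Instead of comparing a fresh slice against the pattern at every in-string position, B builds the in-string eligibility mask in one pass and then uses str.find to jump between pattern occurrences, checking each against the mask.
import Mathlib
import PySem

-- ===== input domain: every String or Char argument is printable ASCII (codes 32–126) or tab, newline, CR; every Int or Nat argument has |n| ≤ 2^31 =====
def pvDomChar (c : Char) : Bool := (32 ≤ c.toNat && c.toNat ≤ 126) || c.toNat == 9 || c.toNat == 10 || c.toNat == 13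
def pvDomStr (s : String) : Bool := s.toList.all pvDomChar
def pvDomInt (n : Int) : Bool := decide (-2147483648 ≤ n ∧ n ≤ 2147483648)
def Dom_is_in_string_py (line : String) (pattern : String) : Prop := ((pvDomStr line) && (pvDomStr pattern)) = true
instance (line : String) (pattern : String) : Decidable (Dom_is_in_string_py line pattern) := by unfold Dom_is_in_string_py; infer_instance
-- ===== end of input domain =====

-- B replaces A's per-position slice comparison by one mask-building pass plus a
-- str.find occurrence scan checked against the mask (alternative algorithm, same result).

-- ===== PORT A =====
-- the condition `char in ['"', "'"] and (i == 0 or line[i-1] != "\\")` (shared verbatim by A and B)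
def quoteCond (line : String) (i : Int) (c : Char) : Bool :=
  (c == '"' || c == '\'') && (i == 0 || !(PySem.Str.pyGet? line (i - 1) == some '\\'))

-- `pattern in line[i : i + len(pattern)]`
def matchCheck (line : String) (pattern : String) (i : Int) : Bool :=
  PySem.Str.isIn pattern (PySem.Str.slice line (some i) (some (i + PySem.Str.len pattern)))

-- the `for i, char in enumerate(line)` loop with early return
def isInStringAux (line : String) (pattern : String) :
    List (Int × Char) → Bool → Option Char → Bool
  | [], _, _ => false
  | (i, c) :: rest, inString, quoteChar =>
    if quoteCond line i c then
      if !inString then isInStringAux line pattern rest true (some c)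
      else if some c == quoteChar then isInStringAux line pattern rest false none
      else isInStringAux line pattern rest inString quoteChar
    else if inString && matchCheck line pattern i then true
    else isInStringAux line pattern rest inString quoteChar

def is_in_string_py (line : String) (pattern : String) : Bool :=
  isInStringAux line pattern (PySem.List.enumerate line.toList 0) false none

-- ===== PORT B =====
-- phase 1 of Source B: build the in-string eligibility mask in one pass
def maskAux (line : String) : List (Int × Char) → Bool → Option Char → List Bool
  | [], _, _ => []
  | (i, c) :: rest, inString, quoteChar =>
    if quoteCond line i c then
      false :: (if !inString then maskAux line rest true (some c)
                else if some c == quoteChar then maskAux line rest false none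
                else maskAux line rest inString quoteChar)
    else inString :: maskAux line rest inString quoteChar

-- phase 2 of Source B: `while True: j = line.find(pattern, start); …`
-- (fuel only bounds the unbounded Python while loop; it is never reached: start
--  strictly increases and stays ≤ len(line), so n+1 iterations always suffice)
def findLoop (line : String) (pattern : String) (mask : List Bool) :
    Nat → Int → Bool
  | 0, _ => false
  | fuel + 1, start =>
    let j := PySem.Str.findFrom line pattern start none
    if j == -1 then false
    else if PySem.List.pyGetD mask j false then true
    else findLoop line pattern mask fuel (j + 1)

def is_in_string_py_alt (line : String) (pattern : String) : Bool :=
  let mask := maskAux line (PySem.List.enumerate line.toList 0) false none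
  if pattern.toList.isEmpty then mask.any id
  else findLoop line pattern mask (line.toList.length + 1) 0

-- ===== PRECONDITION & SPEC =====
def Spec_is_in_string_py (line : String) (pattern : String) (out : Bool) : Prop := out = is_in_string_py_alt line pattern
instance (line : String) (pattern : String) (out : Bool) : Decidable (Spec_is_in_string_py line pattern out) := by unfold Spec_is_in_string_py; infer_instance

-- ===== CLAIM (what is proved, stated in full; the proofs are below) =====
def Claim_equal_is_in_string_py : Prop := ∀ (line : String) (pattern : String), Dom_is_in_string_py line pattern → Spec_is_in_string_py line pattern (is_in_string_py line pattern)

-- ===== LEMMAS AND PROOFS =====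

theorem length_maskAux (line : String) (pairs : List (Int × Char)) (inS : Bool)
    (q : Option Char) : (maskAux line pairs inS q).length = pairs.length := by
  induction pairs generalizing inS q with
  | nil => rfl
  | cons p rest ih =>
    obtain ⟨i, c⟩ := p
    simp only [maskAux]
    split_ifs <;> simp [ih]

-- A's loop equals "some position of the mask is eligible and matches"
theorem aux_eq_any (line pattern : String) (cs : List Char) (s : Nat) (inS : Bool)
    (q : Option Char) :
    isInStringAux line pattern (PySem.List.enumerate cs (s : Int)) inS q =
      ((maskAux line (PySem.List.enumerate cs (s : Int)) inS q).zipIdx s).any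
        (fun p => p.1 && matchCheck line pattern (p.2 : Int)) := by
  induction cs generalizing s inS q with
  | nil => simp [PySem.List.enumerate, isInStringAux, maskAux]
  | cons c rest ih =>
    have hcast : (s : Int) + 1 = ((s + 1 : Nat) : Int) := by push_cast; ring
    rw [PySem.List.enumerate_cons, hcast]
    simp only [isInStringAux, maskAux]
    split_ifs with h1 h2 h3 h4
    · simpa [List.zipIdx_cons] using ih (s + 1) true (some c)
    · simpa [List.zipIdx_cons] using ih (s + 1) false none
    · simpa [List.zipIdx_cons] using ih (s + 1) inS q
    · simp [List.zipIdx_cons, h4]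
    · rw [Bool.not_eq_true] at h4
      simp only [List.zipIdx_cons, List.any_cons]
      rw [ih (s + 1) inS q]
      simp [h4]

theorem any_zipIdx_iff (l : List Bool) (s : Nat) (f : Nat → Bool) :
    (l.zipIdx s).any (fun p => p.1 && f p.2) = true ↔
      ∃ k, ∃ h : k < l.length, l[k] = true ∧ f (s + k) = true := by
  induction l generalizing s with
  | nil => simp
  | cons b rest ih =>
    rw [List.zipIdx_cons]
    simp only [List.any_cons, Bool.or_eq_true, Bool.and_eq_true, ih]
    constructor
    · rintro (⟨hb, hf⟩ | ⟨k, hk, hl, hf⟩)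
      · exact ⟨0, by simp, by simpa using hb, by simpa using hf⟩
      · exact ⟨k + 1, by simpa using hk, by simpa using hl, by
          have : s + 1 + k = s + (k + 1) := by omega
          rw [← this]; exact hf⟩
    · rintro ⟨k, hk, hl, hf⟩
      cases k with
      | zero => exact Or.inl ⟨by simpa using hl, by simpa using hf⟩
      | succ k => exact Or.inr ⟨k, by simpa using hk, by simpa using hl, by
          have : s + 1 + k = s + (k + 1) := by omega
          rw [this]; exact hf⟩

theorem matchCheck_empty (line pattern : String) (hp : pattern.toList = []) (i : Int) :
    matchCheck line pattern i = true := by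
  rw [matchCheck, PySem.Str.isIn_iff_infix, hp]
  exact List.nil_infix

theorem matchCheck_iff (line pattern : String) (k : Nat) :
    matchCheck line pattern (k : Int) = true ↔
      pattern.toList <+: line.toList.drop k := by
  rw [matchCheck, PySem.Str.isIn_iff_infix]
  have hsl : (PySem.Str.slice line (some (k : Int))
      (some ((k : Int) + PySem.Str.len pattern))).toList =
      (line.toList.drop k).take pattern.toList.length := by
    simp [PySem.Str.slice, PySem.Str.len_eq, PySem.List.slice_natCast_add]
  rw [hsl]
  constructor
  · intro h
    have hle : pattern.toList.length ≤
        ((line.toList.drop k).take pattern.toList.length).length := h.length_le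
    have hlen : ((line.toList.drop k).take pattern.toList.length).length ≤
        pattern.toList.length := by
      simp
    have heq : pattern.toList = (line.toList.drop k).take pattern.toList.length :=
      h.eq_of_length (by omega)
    exact List.prefix_iff_eq_take.mpr heq
  · intro h
    have heq := List.prefix_iff_eq_take.mp h
    rw [← heq]

theorem findLoop_iff (line pattern : String) (mask : List Bool)
    (hp : pattern.toList ≠ []) (hm : mask.length = line.toList.length) :
    ∀ (fuel : Nat) (start : Nat), start ≤ line.toList.length →
      line.toList.length + 1 - start ≤ fuel →
      (findLoop line pattern mask fuel (start : Int) = true ↔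
        ∃ k, start ≤ k ∧ ∃ h : k < mask.length, mask[k] = true ∧
          pattern.toList <+: line.toList.drop k) := by
  intro fuel
  induction fuel with
  | zero => intro start h1 h2; omega
  | succ fuel ih =>
    intro start h1 h2
    simp only [findLoop, PySem.Str.findFrom_eq]
    by_cases hneg : PySem.Chars.findFrom line.toList pattern.toList (start : Int) none = -1
    · have hno : ¬ pattern.toList <:+: line.toList.drop start :=
        (PySem.Chars.findFrom_natCast_eq_neg_one_iff line.toList pattern.toList start h1).mp hneg
      simp only [hneg]

      constructor
      · intro habs; simp at habs
      · rintro ⟨k, hk, hklt, hmk, hpk⟩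
        exfalso
        apply hno
        have hdd : line.toList.drop k = (line.toList.drop start).drop (k - start) := by
          rw [List.drop_drop]; congr 1; omega
        exact List.infix_iff_prefix_suffix.mpr ⟨_, hdd ▸ hpk, List.drop_suffix _ _⟩
    · obtain ⟨hle, hpre, hmin⟩ :=
        PySem.Chars.findFrom_natCast_spec line.toList pattern.toList start h1 hneg
      set j := PySem.Chars.findFrom line.toList pattern.toList (start : Int) none with hjdef
      have hj0 : (0 : Int) ≤ j := le_trans (Int.natCast_nonneg start) hle
      have hplen : 0 < pattern.toList.length := List.length_pos_iff.mpr hp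
      have hdlen := hpre.length_le
      rw [List.length_drop] at hdlen
      have hjlt : j.toNat < line.toList.length := by omega
      have hjm : j.toNat < mask.length := by omega
      have hget : PySem.List.pyGetD mask j false = mask[j.toNat] := by
        exact PySem.List.pyGetD_eq_getElem mask false hj0 (by omega)
      by_cases hmask : mask[j.toNat] = true
      · simp only [hget, hmask, if_true]
        constructor
        · intro _
          exact ⟨j.toNat, by omega, hjm, hmask, hpre⟩
        · intro _
          simp [hneg]
      · simp only [hget]
        have hjcast : j + 1 = ((j.toNat + 1 : Nat) : Int) := by omega
        rw [hjcast]
        have hiff := ih (j.toNat + 1) (by omega) (by omega)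
        constructor
        · intro hrun
          have : findLoop line pattern mask fuel ((j.toNat + 1 : Nat) : Int) = true := by
            revert hrun
            simp [hneg, hmask]
          obtain ⟨k, hk, hklt, hmk, hpk⟩ := hiff.mp this
          exact ⟨k, by omega, hklt, hmk, hpk⟩
        · rintro ⟨k, hk, hklt, hmk, hpk⟩
          have hkge : j.toNat + 1 ≤ k := by
            rcases Nat.lt_or_ge k (j.toNat + 1) with hlt | hge
            · exfalso
              rcases Nat.lt_or_ge k j.toNat with hlt2 | hge2
              · exact hmin k hk hlt2 hpk
              · have hkj : k = j.toNat := by omega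
                exact hmask (by simpa [hkj] using hmk)
            · exact hge
          have hrun := hiff.mpr ⟨k, hkge, hklt, hmk, hpk⟩
          have hcond : ¬((j == -1) = true) := by simpa using hneg
          rw [if_neg hcond, if_neg hmask]
          exact hrun

-- ===== VERDICT (by name: the statement is the Claim_ definition above) =====
theorem is_in_string_py_spec : Claim_equal_is_in_string_py := by
  unfold Claim_equal_is_in_string_py
  intro line pattern _
  show is_in_string_py line pattern = is_in_string_py_alt line pattern
  rw [is_in_string_py, is_in_string_py_alt]
  have hA : isInStringAux line pattern (PySem.List.enumerate line.toList 0) false none =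
      ((maskAux line (PySem.List.enumerate line.toList 0) false none).zipIdx 0).any
        (fun p => p.1 && matchCheck line pattern (p.2 : Int)) := by
    simpa using aux_eq_any line pattern line.toList 0 false none
  rw [hA]
  have hmlen : (maskAux line (PySem.List.enumerate line.toList 0) false none).length =
      line.toList.length := by
    rw [length_maskAux, PySem.List.length_enumerate]
  have hzip := any_zipIdx_iff (maskAux line (PySem.List.enumerate line.toList 0) false none)
    0 (fun k => matchCheck line pattern (k : Int))
  by_cases hp : pattern.toList = []
  · rw [if_pos (by simp [hp])]
    rw [Bool.eq_iff_iff]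
    constructor
    · intro h
      obtain ⟨k, hklt, hmk, _⟩ := hzip.mp h
      exact List.any_eq_true.mpr ⟨_, List.getElem_mem hklt, hmk⟩
    · intro h
      obtain ⟨x, hxm, hx⟩ := List.any_eq_true.mp h
      obtain ⟨k, hklt, rfl⟩ := List.mem_iff_getElem.mp hxm
      exact hzip.mpr ⟨k, hklt, hx, by simpa using matchCheck_empty line pattern hp (k : Int)⟩
  · rw [if_neg (by simp [hp])]
    have hfind := findLoop_iff line pattern
      (maskAux line (PySem.List.enumerate line.toList 0) false none) hp hmlen
      (line.toList.length + 1) 0 (by omega) (by omega)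
    rw [Bool.eq_iff_iff]
    constructor
    · intro h
      obtain ⟨k, hklt, hmk, hmc⟩ := hzip.mp h
      exact hfind.mpr ⟨k, by omega, hklt, hmk,
        (matchCheck_iff line pattern k).mp (by simpa using hmc)⟩
    · intro h
      obtain ⟨k, _, hklt, hmk, hpk⟩ := hfind.mp h
      exact hzip.mpr ⟨k, hklt, hmk, by
        simpa using (matchCheck_iff line pattern k).mpr hpk⟩
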